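-- pv_equiv track=rewrite | github.com/tmzh/aoc2021 | day9/main.py | three_largest_basins
-- ===== SOURCE A (Python) =====
-- from itertools import chain, product
-- from collections import Counter
--
-- def neighbhors(i, j, w, h):
--     for x in [-1, 1]:
--         if 0 <= (i + x) < h:
--             yield [i + x, j]
--         if 0 <= (j + x) < w:
--             yield [i, j + x]
--
-- def label_neighbhors(grid, labels, i, j,  label):
--     h, w = len(grid), len(grid[0])
--     for m, n in neighbhors(i, j, w, h):
--         if grid[m][n] < 9 and labels[m][n] == 0:
--             labels[m][n] = label
--             label_neighbhors(grid, labels, m, n, label)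
--
-- def three_largest_basins(grid):
--     label = 0
--     h, w = len(grid), len(grid[0])
--     labels = [[0]*w for _ in range(h)]
--     for i in range(h):
--         for j in range(w):
--             if all([grid[i][j] < grid[m][n] for m, n in neighbhors(i, j, w, h)]):
--                 label = label + 1
--                 labels[i][j] = label
--                 label_neighbhors(grid, labels, i, j, label)
--     counts = Counter(chain.from_iterable(labels))
--     del counts[0]
--     result = 1
--     for _, v in counts.most_common(3):
--         result *= v
--     return result
-- ===== SOURCE B (Python) =====
-- def three_largest_basins(grid):
--     h, w = len(grid), len(grid[0])
--     deltas = ((-1, 0), (0, -1), (1, 0), (0, 1))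
--
--     def nbrs(i, j):
--         return [(i + di, j + dj) for di, dj in deltas
--                 if 0 <= i + di < h and 0 <= j + dj < w]
--
--     cells = [(i, j) for i in range(h) for j in range(w)]
--
--     # pass 1: collect every strict local minimum (labels never consulted)
--     seeds = [p for p in cells
--              if all(grid[p[0]][p[1]] < grid[m][n] for m, n in nbrs(*p))]
--
--     # pass 2: flood each seed iteratively with an explicit stack
--     labels = [[0] * w for _ in range(h)]
--     label = 0
--     for i, j in seeds:
--         label += 1
--         labels[i][j] = label
--         stack = [(i, j)]
--         while stack:
--             m, n = stack.pop()
--             for p, q in nbrs(m, n):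
--                 if grid[p][q] < 9 and labels[p][q] == 0:
--                     labels[p][q] = label
--                     stack.append((p, q))
--
--     # pass 3: size of each basin by direct counting, no Counter
--     flat = [labels[i][j] for i, j in cells]
--     sizes = []
--     for l in range(1, label + 1):
--         c = flat.count(l)
--         if c:
--             sizes.append(c)
--     sizes.sort(reverse=True)
--     result = 1
--     for v in sizes[:3]:
--         result *= v
--     return result
-- ===== Notes on version B (the rewrite author's own statement) =====
-- stated objective: alternative
-- what changed: A interleaves seed detection with a recursive flood fill and takes sizes via Counter + del counts[0] + most_common(3); B runs three staged passes: collect all strict-local-minimum seeds first, flood each seed iteratively with an explicit stack, then count the cells of each label 1..label directly with list.count, sort the nonzero counts descending and multiply the top three.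
import Mathlib
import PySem

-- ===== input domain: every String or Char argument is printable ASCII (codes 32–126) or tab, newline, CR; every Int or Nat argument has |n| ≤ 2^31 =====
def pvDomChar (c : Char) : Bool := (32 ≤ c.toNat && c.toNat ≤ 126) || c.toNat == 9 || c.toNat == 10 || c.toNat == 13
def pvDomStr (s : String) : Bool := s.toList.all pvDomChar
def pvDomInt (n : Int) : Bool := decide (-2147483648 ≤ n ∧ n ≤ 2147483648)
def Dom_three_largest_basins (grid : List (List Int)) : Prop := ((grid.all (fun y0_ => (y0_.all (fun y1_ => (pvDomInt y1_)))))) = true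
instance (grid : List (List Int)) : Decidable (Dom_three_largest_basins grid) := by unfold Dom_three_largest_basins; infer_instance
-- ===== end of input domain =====

-- B replaces A's interleaved detect-and-recursively-flood main loop (plus Counter /
-- del / most_common) by three staged passes: collect all strict-minimum seeds first,
-- then flood each seed with an explicit stack, then count the cells of each label
-- 1..label directly with list.count and sort the nonzero counts; same return value
-- on every input A returns on (objective: alternative, not faster).

-- ===== PORT A =====
-- A's neighbhors generator: for x in [-1,1] yield (i+x,j) / (i,j+x) under the bound checks
def pvNbrs (i j w h : Int) : List (Int × Int) :=
  (if 0 ≤ i - 1 ∧ i - 1 < h then [(i - 1, j)] else []) ++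
  (if 0 ≤ j - 1 ∧ j - 1 < w then [(i, j - 1)] else []) ++
  (if 0 ≤ i + 1 ∧ i + 1 < h then [(i + 1, j)] else []) ++
  (if 0 ≤ j + 1 ∧ j + 1 < w then [(i, j + 1)] else [])

-- grid[p] for indices that are in range under Pre_ (exact there)
def pvCell (grid : List (List Int)) (p : Int × Int) : Int :=
  (PySem.List.pyGet? ((PySem.List.pyGet? grid p.1).getD []) p.2).getD 0

-- the labels matrix as a dict from coordinates; an absent cell is still 0
def pvGet (L : PySem.Dict (Int × Int) Int) (q : Int × Int) : Int :=
  PySem.Dict.getD L q 0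

-- the row-major cell list: for i in range(h): for j in range(w)
def pvCells (h w : Int) : List (Int × Int) :=
  (PySem.List.pyRange 0 h 1).flatMap (fun i => (PySem.List.pyRange 0 w 1).map (fun j => (i, j)))

-- all([grid[i][j] < grid[m][n] for m, n in neighbhors(i, j, w, h)])
def pvIsMin (grid : List (List Int)) (w h : Int) (p : Int × Int) : Bool :=
  (pvNbrs p.1 p.2 w h).all (fun q => decide (pvCell grid p < pvCell grid q))

-- A's recursive label_neighbhors; fuel = h*w+1 only makes the recursion total, it never
-- runs out on the calls the ports make (each recursive call first labels a fresh cell)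
def floodA (grid : List (List Int)) (w h lab : Int) :
    Nat → PySem.Dict (Int × Int) Int → Int × Int → PySem.Dict (Int × Int) Int
  | 0, L, _ => L
  | fuel + 1, L, p =>
      (pvNbrs p.1 p.2 w h).foldl
        (fun L q =>
          if pvCell grid q < 9 ∧ pvGet L q = 0 then
            floodA grid w h lab fuel (L.insert q lab) q
          else L) L

def three_largest_basins (grid : List (List Int)) : Int :=
  let h : Int := grid.length
  let w : Int := (grid.headD []).length
  let fuel : Nat := grid.length * (grid.headD []).length + 1
  let fin := (pvCells h w).foldl
    (fun (st : Int × PySem.Dict (Int × Int) Int) p =>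
      if pvIsMin grid w h p then
        (st.1 + 1, floodA grid w h (st.1 + 1) fuel (st.2.insert p (st.1 + 1)) p)
      else st)
    (0, PySem.Dict.empty)
  let counts := (PySem.Dict.counter ((pvCells h w).map (pvGet fin.2))).erase 0
  let top := (PySem.List.sorted counts.items (fun kv => kv.2) true).take 3
  top.foldl (fun r kv => r * kv.2) 1

-- ===== PORT B =====
-- B's delta-list neighbour comprehension: [(i+di,j+dj) … if 0<=i+di<h and 0<=j+dj<w]
def bDeltas : List (Int × Int) := [(-1, 0), (0, -1), (1, 0), (0, 1)]

def bNbrs (h w i j : Int) : List (Int × Int) :=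
  (bDeltas.filter (fun d =>
      decide (0 ≤ i + d.1 ∧ i + d.1 < h ∧ 0 ≤ j + d.2 ∧ j + d.2 < w))).map
    (fun d => (i + d.1, j + d.2))

-- grid[i][j]
def bAt (grid : List (List Int)) (i j : Int) : Int :=
  PySem.List.pyGetD (PySem.List.pyGetD grid i []) j 0

-- cells = [(i, j) for i in range(h) for j in range(w)]
def bCells (h w : Int) : List (Int × Int) :=
  ((PySem.List.pyRange 0 h 1).map
    (fun i => (PySem.List.pyRange 0 w 1).map (fun j => (i, j)))).flatten

-- seed test: all(grid[p0][p1] < grid[m][n] for m, n in nbrs(*p))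
def bSeed (grid : List (List Int)) (h w : Int) (p : Int × Int) : Bool :=
  (bNbrs h w p.1 p.2).all (fun q => decide (bAt grid p.1 p.2 < bAt grid q.1 q.2))

-- B's while-stack flood: pop a cell, mark-and-push every unlabeled low neighbour
def floodB (grid : List (List Int)) (h w lab : Int) :
    Nat → PySem.Dict (Int × Int) Int → List (Int × Int) → PySem.Dict (Int × Int) Int
  | 0, L, _ => L
  | _ + 1, L, [] => L
  | fuel + 1, L, p :: stk =>
      let st := (bNbrs h w p.1 p.2).foldl
        (fun (st : PySem.Dict (Int × Int) Int × List (Int × Int)) q =>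
          if bAt grid q.1 q.2 < 9 ∧ PySem.Dict.getD st.1 q 0 = 0 then (st.1.insert q lab, q :: st.2) else st)
        (L, stk)
      floodB grid h w lab fuel st.1 st.2

def three_largest_basins_alt (grid : List (List Int)) : Int :=
  let h : Int := grid.length
  let w : Int := (grid.headD []).length
  let fuel : Nat := grid.length * (grid.headD []).length + 1
  let cells := bCells h w
  let seeds := cells.filter (bSeed grid h w)
  let fin := seeds.foldl
    (fun (st : Int × PySem.Dict (Int × Int) Int) p =>
      (st.1 + 1, floodB grid h w (st.1 + 1) fuel (st.2.insert p (st.1 + 1)) [p]))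
    (0, PySem.Dict.empty)
  let flat := cells.map (fun p => PySem.Dict.getD fin.2 p 0)
  let sizes := (PySem.List.pyRange 1 (fin.1 + 1) 1).foldl
    (fun acc l => if ((flat.count l : Int)) ≠ 0 then acc ++ [((flat.count l : Int))] else acc) []
  let sizes2 := PySem.List.sorted sizes (fun v => v) true
  (sizes2.take 3).foldl (fun r v => r * v) 1

-- ===== PRECONDITION & SPEC =====
-- Pre_ excludes exactly the inputs where A raises IndexError: the empty grid (grid[0])
-- and grids with a row shorter than the first row (grid[i][j] for j < len(grid[0])).
def Pre_three_largest_basins (grid : List (List Int)) : Prop :=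
  grid ≠ [] ∧ ∀ row ∈ grid, (grid.headD []).length ≤ row.length
instance (grid : List (List Int)) : Decidable (Pre_three_largest_basins grid) := by
  unfold Pre_three_largest_basins; infer_instance

def pvWitness_three_largest_basins : List (List Int) := [[2, 1, 9], [9, 9, 9], [1, 9, 0]]

def Spec_three_largest_basins (grid : List (List Int)) (out : Int) : Prop := out = three_largest_basins_alt grid
instance (grid : List (List Int)) (out : Int) : Decidable (Spec_three_largest_basins grid out) := by unfold Spec_three_largest_basins; infer_instance

-- ===== CLAIM (what is proved, stated in full; the proofs are below) =====
def Claim_equal_three_largest_basins : Prop := ∀ (grid : List (List Int)), Dom_three_largest_basins grid → Pre_three_largest_basins grid → Spec_three_largest_basins grid (three_largest_basins grid)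

-- ===== LEMMAS AND PROOFS =====

-- p is an in-range cell of the h×w grid
def pvInR (h w : Int) (p : Int × Int) : Prop :=
  0 ≤ p.1 ∧ p.1 < h ∧ 0 ≤ p.2 ∧ p.2 < w

-- flood condition: cell is low and still unlabeled in state L
def pvGood (grid : List (List Int)) (L : PySem.Dict (Int × Int) Int) (q : Int × Int) : Prop :=
  pvCell grid q < 9 ∧ pvGet L q = 0

-- number of unlabeled in-range cells (fuel measure)
def pvZ (h w : Int) (L : PySem.Dict (Int × Int) Int) : Nat :=
  (pvCells h w).countP (fun q => decide (pvGet L q = 0))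

-- reachability through good cells, one or more adjacency steps
inductive pvRch (w h : Int) (good : Int × Int → Prop) (s : Int × Int) : Int × Int → Prop
  | base {q : Int × Int} : q ∈ pvNbrs s.1 s.2 w h → good q → pvRch w h good s q
  | step {p q : Int × Int} : pvRch w h good s p → q ∈ pvNbrs p.1 p.2 w h → good q →
      pvRch w h good s q

-- the union of reach-sets from a list of start cells (A's neighbour fold)
def pvSA (grid : List (List Int)) (w h : Int) (ns : List (Int × Int))
    (L : PySem.Dict (Int × Int) Int) (r : Int × Int) : Prop :=
  ∃ q ∈ ns, pvGood grid L q ∧ (r = q ∨ pvRch w h (pvGood grid L) q r)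

-- the union of reach-sets from the stack cells (B's invariant)
def pvSB (grid : List (List Int)) (w h : Int) (stk : List (Int × Int))
    (L : PySem.Dict (Int × Int) Int) (r : Int × Int) : Prop :=
  ∃ e ∈ stk, pvRch w h (pvGood grid L) e r

-- ---- B-side helpers agree with A-side helpers on in-range cells ----

theorem bNbrs_eq (h w : Int) (p : Int × Int) (hp : pvInR h w p) :
    bNbrs h w p.1 p.2 = pvNbrs p.1 p.2 w h := by
  obtain ⟨i, j⟩ := p
  obtain ⟨h1, h2, h3, h4⟩ := hp
  simp only at h1 h2 h3 h4
  unfold bNbrs bDeltas pvNbrs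
  simp only [List.filter_cons, List.filter_nil, decide_eq_true_eq]
  split_ifs <;> (try (exfalso; omega)) <;> simp <;> omega

theorem bCells_eq (h w : Int) : bCells h w = pvCells h w := by
  unfold bCells pvCells
  rw [List.flatMap_def]

theorem bSeed_eq (grid : List (List Int)) (h w : Int) (p : Int × Int) (hp : pvInR h w p) :
    bSeed grid h w p = pvIsMin grid w h p := by
  unfold bSeed
  rw [bNbrs_eq h w p hp]
  rfl

-- ---- dict / counting basics ----

theorem pvGet_insert (L : PySem.Dict (Int × Int) Int) (q x : Int × Int) (v : Int) :
    pvGet (L.insert q v) x = if x = q then v else pvGet L x := by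
  simp [pvGet, PySem.Dict.getD_insert]

theorem pvGood_insert (grid : List (List Int)) (L : PySem.Dict (Int × Int) Int)
    (q x : Int × Int) (v : Int) (hv : v ≠ 0) :
    pvGood grid (L.insert q v) x ↔ pvGood grid L x ∧ x ≠ q := by
  unfold pvGood
  rw [pvGet_insert]
  by_cases hx : x = q <;> simp [hx, hv]

theorem pvNbrs_inR (h w : Int) (p q : Int × Int) (hp : pvInR h w p)
    (hq : q ∈ pvNbrs p.1 p.2 w h) : pvInR h w q := by
  unfold pvNbrs at hq
  unfold pvInR at hp ⊢
  simp only [List.mem_append] at hq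
  rcases hq with ((hq | hq) | hq) | hq <;>
    (split_ifs at hq with hc <;> simp_all)

theorem mem_pvCells (h w : Int) (p : Int × Int) : p ∈ pvCells h w ↔ pvInR h w p := by
  unfold pvCells pvInR
  simp only [List.mem_flatMap, List.mem_map, PySem.List.mem_pyRange_one]
  constructor
  · rintro ⟨i, ⟨h1, h2⟩, j, ⟨h3, h4⟩, rfl⟩
    exact ⟨h1, h2, h3, h4⟩
  · rintro ⟨h1, h2, h3, h4⟩
    exact ⟨p.1, ⟨h1, h2⟩, p.2, ⟨h3, h4⟩, rfl⟩

theorem length_pvCells (h w : Int) : (pvCells h w).length = h.toNat * w.toNat := by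
  unfold pvCells
  rw [List.length_flatMap]
  have : ∀ i : Int, ((PySem.List.pyRange 0 w 1).map (fun j => (i, j))).length = w.toNat := by
    intro i; rw [List.length_map, PySem.List.length_pyRange_one]; omega
  calc ((PySem.List.pyRange 0 h 1).map
          (fun i => ((PySem.List.pyRange 0 w 1).map (fun j => (i, j))).length)).sum
      = ((PySem.List.pyRange 0 h 1).map (fun _ => w.toNat)).sum := by
        exact congrArg List.sum (List.map_congr_left (fun i _ => this i))
    _ = (PySem.List.pyRange 0 h 1).length * w.toNat := by
        rw [List.map_const', List.sum_replicate, smul_eq_mul]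
    _ = h.toNat * w.toNat := by
        rw [PySem.List.length_pyRange_one]
        have : (h - 0).toNat = h.toNat := by omega
        rw [this]

theorem countP_lt_pointwise {α : Type} (l : List α) (f g : α → Bool)
    (hfg : ∀ x ∈ l, f x = true → g x = true) (q : α) (hq : q ∈ l)
    (hf : f q = false) (hg : g q = true) : l.countP f < l.countP g := by
  induction l with
  | nil => simp at hq
  | cons a t ihl =>
    rcases List.mem_cons.mp hq with rfl | hqt
    · have hle : t.countP f ≤ t.countP g := by
        apply List.countP_mono_left
        intro x hx; exact hfg x (List.mem_cons_of_mem _ hx)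
      rw [List.countP_cons, List.countP_cons, hf, hg]; simp; omega
    · have hlt : t.countP f < t.countP g := by
        apply ihl (fun x hx hfx => hfg x (List.mem_cons_of_mem _ hx) hfx) hqt
      rw [List.countP_cons, List.countP_cons]
      have : (if f a then 1 else 0) ≤ (if g a then 1 else 0) := by
        by_cases hfa : f a
        · rw [if_pos hfa, if_pos (hfg a (List.mem_cons_self) hfa)]
        · simp [hfa]
      omega

theorem pvZ_le_pointwise (h w : Int) (L L' : PySem.Dict (Int × Int) Int)
    (hz : ∀ x, pvGet L' x = 0 → pvGet L x = 0) : pvZ h w L' ≤ pvZ h w L := by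
  unfold pvZ
  apply List.countP_mono_left
  intro x _ hx
  simp only [decide_eq_true_eq] at hx ⊢
  exact hz x hx

theorem pvZ_insert_lt (h w : Int) (L : PySem.Dict (Int × Int) Int) (q : Int × Int)
    (v : Int) (hin : pvInR h w q) (h0 : pvGet L q = 0) (hv : v ≠ 0) :
    pvZ h w (L.insert q v) < pvZ h w L := by
  unfold pvZ
  have hfg : ∀ x ∈ pvCells h w,
      decide (pvGet (L.insert q v) x = 0) = true → decide (pvGet L x = 0) = true := by
    intro x _ hx
    simp only [decide_eq_true_eq] at hx ⊢
    rw [pvGet_insert] at hx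
    by_cases hxq : x = q
    · subst hxq; exact h0
    · rwa [if_neg hxq] at hx
  have hf : decide (pvGet (L.insert q v) q = 0) = false := by
    simp only [decide_eq_false_iff_not]
    rw [pvGet_insert, if_pos rfl]; exact hv
  have hg : decide (pvGet L q = 0) = true := by simp only [decide_eq_true_eq]; exact h0
  exact countP_lt_pointwise _ _ _ hfg q ((mem_pvCells h w q).mpr hin) hf hg

theorem pvZ_le_area (h w : Int) (L : PySem.Dict (Int × Int) Int) :
    pvZ h w L ≤ h.toNat * w.toNat := by
  calc pvZ h w L ≤ (pvCells h w).length := List.countP_le_length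
    _ = h.toNat * w.toNat := length_pvCells h w

-- ---- reachability lemmas ----

theorem pvRch_mono (w h : Int) (good good' : Int × Int → Prop)
    (hg : ∀ x, good x → good' x) (s r : Int × Int)
    (hr : pvRch w h good s r) : pvRch w h good' s r := by
  induction hr with
  | base h1 h2 => exact .base h1 (hg _ h2)
  | step _ h1 h2 ih => exact .step ih h1 (hg _ h2)

theorem pvRch_trans (w h : Int) (good : Int × Int → Prop) (s m r : Int × Int)
    (h1 : pvRch w h good s m) (h2 : pvRch w h good m r) : pvRch w h good s r := by
  induction h2 with
  | base hq hgood => exact .step h1 hq hgood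
  | step _ hq hgood ih => exact .step ih hq hgood

theorem pvRch_firstStep (w h : Int) (good : Int × Int → Prop) (s r : Int × Int) :
    pvRch w h good s r ↔
      ∃ q, q ∈ pvNbrs s.1 s.2 w h ∧ good q ∧ (r = q ∨ pvRch w h good q r) := by
  constructor
  · intro hr
    induction hr with
    | base hq hgood => exact ⟨_, hq, hgood, Or.inl rfl⟩
    | step hp hq hgood ih =>
      rcases ih with ⟨q0, h1, h2, h3 | h3⟩
      · exact ⟨q0, h1, h2, Or.inr (.base (h3 ▸ hq) hgood)⟩
      · exact ⟨q0, h1, h2, Or.inr (.step h3 hq hgood)⟩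
  · rintro ⟨q, hq, hg, rfl | hr⟩
    · exact .base hq hg
    · induction hr with
      | base h1 h2 => exact .step (.base hq hg) h1 h2
      | step _ h1 h2 ih => exact .step ih h1 h2

theorem pvRch_absorb (w h : Int) (good : Int × Int → Prop) (M : Int × Int → Prop)
    (hM : ∀ m r', M m → r' ∈ pvNbrs m.1 m.2 w h → good r' → M r')
    (s r : Int × Int) (hs : M s) (hr : pvRch w h good s r) : M r := by
  induction hr with
  | base h1 h2 => exact hM _ _ hs h1 h2
  | step _ h1 h2 ih => exact hM _ _ ih h1 h2

theorem pvRch_avoid (w h : Int) (good : Int × Int → Prop) (M : Int × Int → Prop)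
    (hM : ∀ m r', M m → r' ∈ pvNbrs m.1 m.2 w h → good r' → M r')
    (s r : Int × Int) (hr : pvRch w h good s r) (hnr : ¬ M r) :
    pvRch w h (fun x => good x ∧ ¬ M x) s r := by
  induction hr with
  | base h1 h2 => exact .base h1 ⟨h2, hnr⟩
  | @step p r' hp h1 h2 ih =>
    by_cases hMp : M p
    · exact absurd (hM _ _ hMp h1 h2) hnr
    · exact .step (ih hMp) h1 ⟨h2, hnr⟩

theorem pvRch_shrink (w h : Int) (good : Int × Int → Prop) (s r : Int × Int)
    (hr : pvRch w h good s r) : r = s ∨ pvRch w h (fun x => good x ∧ x ≠ s) s r := by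
  induction hr with
  | @base q h1 h2 =>
    by_cases hqs : q = s
    · exact Or.inl hqs
    · exact Or.inr (.base h1 ⟨h2, hqs⟩)
  | @step p q hp h1 h2 ih =>
    by_cases hqs : q = s
    · exact Or.inl hqs
    · rcases ih with rfl | ih'
      · exact Or.inr (.base h1 ⟨h2, hqs⟩)
      · exact Or.inr (.step ih' h1 ⟨h2, hqs⟩)

theorem pvRch_push (w h : Int) (good : Int × Int → Prop) (M : Int × Int → Prop)
    (stk1 : List (Int × Int)) (hMstk : ∀ x, M x → x ∈ stk1)
    (e r : Int × Int) (he : e ∈ stk1) (hr : pvRch w h good e r) :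
    M r ∨ ∃ e' ∈ stk1, pvRch w h (fun x => good x ∧ ¬ M x) e' r := by
  induction hr with
  | @base q h1 h2 =>
    by_cases hMq : M q
    · exact Or.inl hMq
    · exact Or.inr ⟨e, he, .base h1 ⟨h2, hMq⟩⟩
  | @step m q hm h1 h2 ih =>
    by_cases hMq : M q
    · exact Or.inl hMq
    · rcases ih with hMm | ⟨e', he', hR⟩
      · exact Or.inr ⟨m, hMstk m hMm, .base h1 ⟨h2, hMq⟩⟩
      · exact Or.inr ⟨e', he', .step hR h1 ⟨h2, hMq⟩⟩

-- ---- characterization of A's recursive flood ----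

theorem foldA_char (grid : List (List Int)) (w h ℓ : Int) (n : Nat) (hℓ : ℓ ≠ 0)
    (ih : ∀ (L : PySem.Dict (Int × Int) Int) (p : Int × Int), pvInR h w p → pvZ h w L < n →
      ∀ r, (pvRch w h (pvGood grid L) p r → pvGet (floodA grid w h ℓ n L p) r = ℓ) ∧
        (¬ pvRch w h (pvGood grid L) p r → pvGet (floodA grid w h ℓ n L p) r = pvGet L r)) :
    ∀ (ns : List (Int × Int)) (L : PySem.Dict (Int × Int) Int),
      (∀ q ∈ ns, pvInR h w q) → pvZ h w L < n + 1 →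
      ∀ r, (pvSA grid w h ns L r →
              pvGet (ns.foldl (fun L q =>
                if pvCell grid q < 9 ∧ pvGet L q = 0 then
                  floodA grid w h ℓ n (L.insert q ℓ) q
                else L) L) r = ℓ) ∧
           (¬ pvSA grid w h ns L r →
              pvGet (ns.foldl (fun L q =>
                if pvCell grid q < 9 ∧ pvGet L q = 0 then
                  floodA grid w h ℓ n (L.insert q ℓ) q
                else L) L) r = pvGet L r) := by
  intro ns
  induction ns with
  | nil =>
    intro L _ _ r
    refine ⟨fun hSA => ?_, fun _ => rfl⟩
    rcases hSA with ⟨y, hy, _⟩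
    simp at hy
  | cons q ns ihns =>
    intro L hns hZ r
    rw [List.foldl_cons]
    have hns' : ∀ x ∈ ns, pvInR h w x := fun x hx => hns x (List.mem_cons_of_mem _ hx)
    by_cases hc : pvCell grid q < 9 ∧ pvGet L q = 0
    · rw [if_pos hc]
      have hqIn : pvInR h w q := hns q List.mem_cons_self
      have hZ1 : pvZ h w (L.insert q ℓ) < n := by
        have := pvZ_insert_lt h w L q ℓ hqIn hc.2 hℓ; omega
      have hch := ih (L.insert q ℓ) q hqIn hZ1
      have hg1 : ∀ x, pvGood grid (L.insert q ℓ) x ↔ pvGood grid L x ∧ x ≠ q :=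
        fun x => pvGood_insert grid L q x ℓ hℓ
      have hRiff : ∀ x, pvRch w h (pvGood grid (L.insert q ℓ)) q x ↔
          pvRch w h (fun y => pvGood grid L y ∧ y ≠ q) q x :=
        fun x => ⟨pvRch_mono w h _ _ (fun y hy => (hg1 y).mp hy) q x,
          pvRch_mono w h _ _ (fun y hy => (hg1 y).mpr hy) q x⟩
      set M : Int × Int → Prop :=
        fun x => x = q ∨ pvRch w h (fun y => pvGood grid L y ∧ y ≠ q) q x with hMdef
      set L2 := floodA grid w h ℓ n (L.insert q ℓ) q with hL2def
      have hL2val : ∀ x, (M x → pvGet L2 x = ℓ) ∧ (¬ M x → pvGet L2 x = pvGet L x) := by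
        intro x
        constructor
        · rintro (rfl | hx)
          · by_cases hrq : pvRch w h (pvGood grid (L.insert x ℓ)) x x
            · exact (hch x).1 hrq
            · rw [(hch x).2 hrq, pvGet_insert, if_pos rfl]
          · exact (hch x).1 ((hRiff x).mpr hx)
        · intro hnx
          have hxq : x ≠ q := fun hxe => hnx (Or.inl hxe)
          have hnR : ¬ pvRch w h (pvGood grid (L.insert q ℓ)) q x :=
            fun hr => hnx (Or.inr ((hRiff x).mp hr))
          rw [(hch x).2 hnR, pvGet_insert, if_neg hxq]
      have hz2 : ∀ x, pvGet L2 x = 0 → pvGet L x = 0 := by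
        intro x hx
        by_cases hMx : M x
        · rw [(hL2val x).1 hMx] at hx; exact absurd hx hℓ
        · rwa [(hL2val x).2 hMx] at hx
      have hg2 : ∀ x, pvGood grid L2 x ↔ pvGood grid L x ∧ ¬ M x := by
        intro x
        unfold pvGood
        constructor
        · rintro ⟨hcell, hzero⟩
          by_cases hMx : M x
          · rw [(hL2val x).1 hMx] at hzero; exact absurd hzero hℓ
          · exact ⟨⟨hcell, by rwa [(hL2val x).2 hMx] at hzero⟩, hMx⟩
        · rintro ⟨⟨hcell, hzero⟩, hMx⟩
          exact ⟨hcell, by rw [(hL2val x).2 hMx]; exact hzero⟩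
      have hMclosed : ∀ m r', M m → r' ∈ pvNbrs m.1 m.2 w h → pvGood grid L r' → M r' := by
        intro m r' hm hadj hgood
        by_cases hr'q : r' = q
        · exact Or.inl hr'q
        · rcases hm with rfl | hm
          · exact Or.inr (.base hadj ⟨hgood, hr'q⟩)
          · exact Or.inr (.step hm hadj ⟨hgood, hr'q⟩)
      have hZ2 : pvZ h w L2 < n + 1 := by
        have := pvZ_le_pointwise h w L L2 hz2; omega
      have ihtail := ihns L2 hns' hZ2
      have hKey : ∀ x, pvSA grid w h (q :: ns) L x ↔ (M x ∨ pvSA grid w h ns L2 x) := by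
        intro x
        constructor
        · rintro ⟨y, hy, hgy, hxy⟩
          rcases List.mem_cons.mp hy with rfl | hyns
          · left
            rcases hxy with rfl | hRxy
            · exact Or.inl rfl
            · rcases pvRch_shrink w h _ y x hRxy with rfl | hR'
              · exact Or.inl rfl
              · exact Or.inr hR'
          · by_cases hMx : M x
            · exact Or.inl hMx
            · right
              by_cases hMy : M y
              · exfalso
                rcases hxy with rfl | hRxy
                · exact hMx hMy
                · exact hMx (pvRch_absorb w h _ M hMclosed y x hMy hRxy)
              · refine ⟨y, hyns, (hg2 y).mpr ⟨hgy, hMy⟩, ?_⟩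
                rcases hxy with rfl | hRxy
                · exact Or.inl rfl
                · refine Or.inr (pvRch_mono w h _ _
                    (fun z hz => (hg2 z).mpr hz) y x
                    (pvRch_avoid w h _ M hMclosed y x hRxy hMx))
        · rintro (hMx | ⟨y, hy, hgy, hxy⟩)
          · refine ⟨q, List.mem_cons_self, hc, ?_⟩
            rcases hMx with rfl | hR
            · exact Or.inl rfl
            · exact Or.inr (pvRch_mono w h _ _ (fun z hz => hz.1) q x hR)
          · refine ⟨y, List.mem_cons_of_mem _ hy, ((hg2 y).mp hgy).1, ?_⟩
            rcases hxy with rfl | hRxy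
            · exact Or.inl rfl
            · exact Or.inr (pvRch_mono w h _ _ (fun z hz => ((hg2 z).mp hz).1) y x hRxy)
      constructor
      · intro hSA
        rcases (hKey r).mp hSA with hMr | hSAr
        · by_cases hSAr2 : pvSA grid w h ns L2 r
          · exact (ihtail r).1 hSAr2
          · rw [(ihtail r).2 hSAr2]; exact (hL2val r).1 hMr
        · exact (ihtail r).1 hSAr
      · intro hSA
        have hMr : ¬ M r := fun hm => hSA ((hKey r).mpr (Or.inl hm))
        have hS2 : ¬ pvSA grid w h ns L2 r := fun hs => hSA ((hKey r).mpr (Or.inr hs))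
        rw [(ihtail r).2 hS2]; exact (hL2val r).2 hMr
    · rw [if_neg hc]
      have hEq : ∀ x, pvSA grid w h (q :: ns) L x ↔ pvSA grid w h ns L x := by
        intro x
        constructor
        · rintro ⟨y, hy, hgy, hxy⟩
          rcases List.mem_cons.mp hy with rfl | hyns
          · exact absurd hgy hc
          · exact ⟨y, hyns, hgy, hxy⟩
        · rintro ⟨y, hy, hgy, hxy⟩
          exact ⟨y, List.mem_cons_of_mem _ hy, hgy, hxy⟩
      have := ihns L hns' hZ r
      exact ⟨fun hSA => this.1 ((hEq r).mp hSA), fun hSA => this.2 (fun hs => hSA ((hEq r).mpr hs))⟩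

theorem floodA_char (grid : List (List Int)) (w h ℓ : Int) (hℓ : ℓ ≠ 0) :
    ∀ (fuel : Nat) (L : PySem.Dict (Int × Int) Int) (p : Int × Int),
      pvInR h w p → pvZ h w L < fuel →
      ∀ r, (pvRch w h (pvGood grid L) p r → pvGet (floodA grid w h ℓ fuel L p) r = ℓ) ∧
        (¬ pvRch w h (pvGood grid L) p r → pvGet (floodA grid w h ℓ fuel L p) r = pvGet L r) := by
  intro fuel
  induction fuel with
  | zero => intro L p _ hZ; omega
  | succ n ihn =>
    intro L p hp hZ r
    have hfold := foldA_char grid w h ℓ n hℓ (fun L p hp hZ => ihn L p hp hZ)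
      (pvNbrs p.1 p.2 w h) L (fun q hq => pvNbrs_inR h w p q hp hq) hZ r
    have hiff : pvSA grid w h (pvNbrs p.1 p.2 w h) L r ↔ pvRch w h (pvGood grid L) p r := by
      unfold pvSA
      rw [pvRch_firstStep]
    show (pvRch w h (pvGood grid L) p r →
        pvGet ((pvNbrs p.1 p.2 w h).foldl (fun L q =>
          if pvCell grid q < 9 ∧ pvGet L q = 0 then
            floodA grid w h ℓ n (L.insert q ℓ) q
          else L) L) r = ℓ) ∧
      (¬ pvRch w h (pvGood grid L) p r →
        pvGet ((pvNbrs p.1 p.2 w h).foldl (fun L q =>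
          if pvCell grid q < 9 ∧ pvGet L q = 0 then
            floodA grid w h ℓ n (L.insert q ℓ) q
          else L) L) r = pvGet L r)
    exact ⟨fun hr => hfold.1 (hiff.mpr hr), fun hr => hfold.2 (fun hs => hr (hiff.mp hs))⟩

-- ---- characterization of B's stack flood ----

-- unfold B's flood one pop, with the neighbour list rewritten to A's (in-range cell)
theorem floodB_succ_cons (grid : List (List Int)) (h w ℓ : Int) (n : Nat)
    (L : PySem.Dict (Int × Int) Int) (p : Int × Int) (rest : List (Int × Int))
    (hp : pvInR h w p) :
    floodB grid h w ℓ (n + 1) L (p :: rest) =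
      floodB grid h w ℓ n
        ((pvNbrs p.1 p.2 w h).foldl
          (fun (st : PySem.Dict (Int × Int) Int × List (Int × Int)) q =>
            if pvCell grid q < 9 ∧ pvGet st.1 q = 0 then (st.1.insert q ℓ, q :: st.2) else st)
          (L, rest)).1
        ((pvNbrs p.1 p.2 w h).foldl
          (fun (st : PySem.Dict (Int × Int) Int × List (Int × Int)) q =>
            if pvCell grid q < 9 ∧ pvGet st.1 q = 0 then (st.1.insert q ℓ, q :: st.2) else st)
          (L, rest)).2 := by
  show floodB grid h w ℓ n
        ((bNbrs h w p.1 p.2).foldl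
          (fun (st : PySem.Dict (Int × Int) Int × List (Int × Int)) q =>
            if pvCell grid q < 9 ∧ pvGet st.1 q = 0 then (st.1.insert q ℓ, q :: st.2) else st)
          (L, rest)).1
        ((bNbrs h w p.1 p.2).foldl
          (fun (st : PySem.Dict (Int × Int) Int × List (Int × Int)) q =>
            if pvCell grid q < 9 ∧ pvGet st.1 q = 0 then (st.1.insert q ℓ, q :: st.2) else st)
          (L, rest)).2 = _
  rw [bNbrs_eq h w p hp]

theorem foldB_step (grid : List (List Int)) (w h ℓ : Int) (hℓ : ℓ ≠ 0) :
    ∀ (ns : List (Int × Int)) (L : PySem.Dict (Int × Int) Int) (stk : List (Int × Int)),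
      (∀ x, ((x ∈ ns ∧ pvGood grid L x) →
          pvGet (ns.foldl (fun st q =>
            if pvCell grid q < 9 ∧ pvGet st.1 q = 0 then (st.1.insert q ℓ, q :: st.2) else st)
            (L, stk)).1 x = ℓ) ∧
        (¬ (x ∈ ns ∧ pvGood grid L x) →
          pvGet (ns.foldl (fun st q =>
            if pvCell grid q < 9 ∧ pvGet st.1 q = 0 then (st.1.insert q ℓ, q :: st.2) else st)
            (L, stk)).1 x = pvGet L x)) ∧
      (∀ e, e ∈ (ns.foldl (fun st q =>
            if pvCell grid q < 9 ∧ pvGet st.1 q = 0 then (st.1.insert q ℓ, q :: st.2) else st)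
            (L, stk)).2 ↔ e ∈ stk ∨ (e ∈ ns ∧ pvGood grid L e)) ∧
      ((∀ q ∈ ns, pvInR h w q) →
        pvZ h w (ns.foldl (fun st q =>
            if pvCell grid q < 9 ∧ pvGet st.1 q = 0 then (st.1.insert q ℓ, q :: st.2) else st)
            (L, stk)).1 +
          (ns.foldl (fun st q =>
            if pvCell grid q < 9 ∧ pvGet st.1 q = 0 then (st.1.insert q ℓ, q :: st.2) else st)
            (L, stk)).2.length ≤ pvZ h w L + stk.length) := by
  intro ns
  induction ns with
  | nil =>
    intro L stk
    refine ⟨fun x => ⟨fun hx => ?_, fun _ => rfl⟩, fun e => by simp, fun _ => le_refl _⟩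
    simp at hx
  | cons q ns ihns =>
    intro L stk
    rw [List.foldl_cons]
    by_cases hc : pvCell grid q < 9 ∧ pvGet L q = 0
    · rw [show (if pvCell grid q < 9 ∧ pvGet (L, stk).1 q = 0 then
            ((L, stk).1.insert q ℓ, q :: (L, stk).2) else (L, stk)) = (L.insert q ℓ, q :: stk)
          from if_pos hc]
      obtain ⟨hval, hstk, hZl⟩ := ihns (L.insert q ℓ) (q :: stk)
      have hg1 : ∀ x, pvGood grid (L.insert q ℓ) x ↔ pvGood grid L x ∧ x ≠ q :=
        fun x => pvGood_insert grid L q x ℓ hℓ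
      refine ⟨?_, ?_, ?_⟩
      · intro x
        constructor
        · rintro ⟨hx, hgx⟩
          rcases List.mem_cons.mp hx with hxq | hxns
          · subst hxq
            have hno : ¬ (x ∈ ns ∧ pvGood grid (L.insert x ℓ) x) := by
              rintro ⟨_, hg⟩; exact ((hg1 x).mp hg).2 rfl
            rw [(hval x).2 hno, pvGet_insert, if_pos rfl]
          · by_cases hxq : x = q
            · subst hxq
              have hno : ¬ (x ∈ ns ∧ pvGood grid (L.insert x ℓ) x) := by
                rintro ⟨_, hg⟩; exact ((hg1 x).mp hg).2 rfl
              rw [(hval x).2 hno, pvGet_insert, if_pos rfl]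
            · exact (hval x).1 ⟨hxns, (hg1 x).mpr ⟨hgx, hxq⟩⟩
        · intro hnx
          have hxq : x ≠ q := by
            rintro rfl; exact hnx ⟨List.mem_cons_self, hc⟩
          have hno : ¬ (x ∈ ns ∧ pvGood grid (L.insert q ℓ) x) := by
            rintro ⟨hx1, hx2⟩
            exact hnx ⟨List.mem_cons_of_mem _ hx1, ((hg1 x).mp hx2).1⟩
          rw [(hval x).2 hno, pvGet_insert, if_neg hxq]
      · intro e
        rw [hstk e]
        simp only [List.mem_cons, hg1 e]
        constructor
        · rintro ((rfl | he) | ⟨h1, h2, h3⟩)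
          · exact Or.inr ⟨Or.inl rfl, hc⟩
          · exact Or.inl he
          · exact Or.inr ⟨Or.inr h1, h2⟩
        · rintro (he | ⟨(rfl | h1), h2⟩)
          · exact Or.inl (Or.inr he)
          · exact Or.inl (Or.inl rfl)
          · by_cases heq : e = q
            · exact Or.inl (Or.inl heq)
            · exact Or.inr ⟨h1, h2, heq⟩
      · intro hInR
        have h1 := hZl (fun x hx => hInR x (List.mem_cons_of_mem _ hx))
        have h2 : pvZ h w (L.insert q ℓ) < pvZ h w L :=
          pvZ_insert_lt h w L q ℓ (hInR q List.mem_cons_self) hc.2 hℓ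
        simp only [List.length_cons] at h1 ⊢
        omega
    · rw [show (if pvCell grid q < 9 ∧ pvGet (L, stk).1 q = 0 then
            ((L, stk).1.insert q ℓ, q :: (L, stk).2) else (L, stk)) = (L, stk)
          from if_neg hc]
      obtain ⟨hval, hstk, hZl⟩ := ihns L stk
      refine ⟨?_, ?_, ?_⟩
      · intro x
        constructor
        · rintro ⟨hx, hgx⟩
          rcases List.mem_cons.mp hx with hxq | hxns
          · subst hxq; exact absurd hgx hc
          · exact (hval x).1 ⟨hxns, hgx⟩
        · intro hnx
          exact (hval x).2 (fun h12 => hnx ⟨List.mem_cons_of_mem _ h12.1, h12.2⟩)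
      · intro e
        rw [hstk e]
        constructor
        · rintro (he | ⟨h1, h2⟩)
          · exact Or.inl he
          · exact Or.inr ⟨List.mem_cons_of_mem _ h1, h2⟩
        · rintro (he | ⟨h1, h2⟩)
          · exact Or.inl he
          · rcases List.mem_cons.mp h1 with hq | h1
            · subst hq; exact absurd h2 hc
            · exact Or.inr ⟨h1, h2⟩
      · intro hInR
        exact hZl (fun x hx => hInR x (List.mem_cons_of_mem _ hx))

theorem floodB_char (grid : List (List Int)) (w h ℓ : Int) (hℓ : ℓ ≠ 0) :
    ∀ (fuel : Nat) (L : PySem.Dict (Int × Int) Int) (stk : List (Int × Int)),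
      (∀ e ∈ stk, pvInR h w e) → pvZ h w L + stk.length ≤ fuel →
      ∀ r, (pvSB grid w h stk L r → pvGet (floodB grid h w ℓ fuel L stk) r = ℓ) ∧
        (¬ pvSB grid w h stk L r → pvGet (floodB grid h w ℓ fuel L stk) r = pvGet L r) := by
  intro fuel
  induction fuel with
  | zero =>
    intro L stk hstk hZ r
    have hempty : stk = [] := by
      cases stk with
      | nil => rfl
      | cons a t => simp [List.length_cons] at hZ
    subst hempty
    refine ⟨fun hSB => ?_, fun _ => rfl⟩
    rcases hSB with ⟨e, he, _⟩; simp at he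
  | succ n ihn =>
    intro L stk hstk hZ r
    cases stk with
    | nil =>
      refine ⟨fun hSB => ?_, fun _ => rfl⟩
      rcases hSB with ⟨e, he, _⟩; simp at he
    | cons p rest =>
      have hpIn : pvInR h w p := hstk p List.mem_cons_self
      obtain ⟨hval, hstk1, hZle⟩ := foldB_step grid w h ℓ hℓ (pvNbrs p.1 p.2 w h) L rest
      set F := (pvNbrs p.1 p.2 w h).foldl
          (fun st q =>
            if pvCell grid q < 9 ∧ pvGet st.1 q = 0 then (st.1.insert q ℓ, q :: st.2) else st)
          (L, rest) with hFdef
      have hunfold : floodB grid h w ℓ (n + 1) L (p :: rest) = floodB grid h w ℓ n F.1 F.2 :=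
        floodB_succ_cons grid h w ℓ n L p rest hpIn
      rw [hunfold]
      set M : Int × Int → Prop := fun x => x ∈ pvNbrs p.1 p.2 w h ∧ pvGood grid L x with hMdef
      have hG1 : ∀ x, pvGood grid F.1 x ↔ pvGood grid L x ∧ ¬ M x := by
        intro x
        unfold pvGood
        constructor
        · rintro ⟨hcell, hz⟩
          by_cases hMx : M x
          · rw [(hval x).1 hMx] at hz; exact absurd hz hℓ
          · exact ⟨⟨hcell, by rwa [(hval x).2 hMx] at hz⟩, hMx⟩
        · rintro ⟨⟨hcell, hz⟩, hMx⟩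
          exact ⟨hcell, by rw [(hval x).2 hMx]; exact hz⟩
      have hstk1InR : ∀ e ∈ F.2, pvInR h w e := by
        intro e he
        rcases (hstk1 e).mp he with he' | ⟨he', _⟩
        · exact hstk e (List.mem_cons_of_mem _ he')
        · exact pvNbrs_inR h w p e hpIn he'
      have hZ1 : pvZ h w F.1 + F.2.length ≤ n := by
        have h1 := hZle (fun x hx => pvNbrs_inR h w p x hpIn hx)
        simp only [List.length_cons] at hZ
        omega
      have iht := ihn F.1 F.2 hstk1InR hZ1
      have hMF2 : ∀ z, M z → z ∈ F.2 := fun z hz => (hstk1 z).mpr (Or.inr ⟨hz.1, hz.2⟩)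
      have hpush : ∀ e x, e ∈ F.2 → pvRch w h (pvGood grid L) e x →
          M x ∨ pvSB grid w h F.2 F.1 x := by
        intro e x he hR
        rcases pvRch_push w h (pvGood grid L) M F.2 hMF2 e x he hR with hMx | ⟨e', he', hR'⟩
        · exact Or.inl hMx
        · exact Or.inr ⟨e', he', pvRch_mono w h _ _ (fun z hz => (hG1 z).mpr hz) e' x hR'⟩
      have hKey : ∀ x, pvSB grid w h (p :: rest) L x ↔ (M x ∨ pvSB grid w h F.2 F.1 x) := by
        intro x
        constructor
        · rintro ⟨e, he, hR⟩
          rcases List.mem_cons.mp he with hep | hrest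
          · subst hep
            rcases (pvRch_firstStep w h (pvGood grid L) e x).mp hR with ⟨y, hy, hgy, hxy⟩
            have hMy : M y := ⟨hy, hgy⟩
            rcases hxy with rfl | hRyx
            · exact Or.inl hMy
            · exact hpush y x (hMF2 y hMy) hRyx
          · exact hpush e x ((hstk1 e).mpr (Or.inl hrest)) hR
        · rintro (hMx | ⟨e, he, hR1⟩)
          · exact ⟨p, List.mem_cons_self, .base hMx.1 hMx.2⟩
          · have hR' : pvRch w h (pvGood grid L) e x :=
              pvRch_mono w h _ _ (fun z hz => ((hG1 z).mp hz).1) e x hR1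
            rcases (hstk1 e).mp he with he' | hMe
            · exact ⟨e, List.mem_cons_of_mem _ he', hR'⟩
            · exact ⟨p, List.mem_cons_self, pvRch_trans w h _ p e x (.base hMe.1 hMe.2) hR'⟩
      constructor
      · intro hSB
        rcases (hKey r).mp hSB with hMr | hSBr
        · by_cases hSB2 : pvSB grid w h F.2 F.1 r
          · exact (iht r).1 hSB2
          · rw [(iht r).2 hSB2]; exact (hval r).1 hMr
        · exact (iht r).1 hSBr
      · intro hSB
        have hMr : ¬ M r := fun hm => hSB ((hKey r).mpr (Or.inl hm))
        have hS1 : ¬ pvSB grid w h F.2 F.1 r := fun hs => hSB ((hKey r).mpr (Or.inr hs))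
        rw [(iht r).2 hS1]; exact (hval r).2 hMr

-- ---- main-loop plumbing ----

theorem seedsFold_eq (grid : List (List Int)) (w h : Int) (FUEL : Nat)
    (hfuel : h.toNat * w.toNat < FUEL) :
    ∀ (seeds : List (Int × Int)) (c : Int) (LA LB : PySem.Dict (Int × Int) Int),
      0 ≤ c → (∀ q ∈ seeds, pvInR h w q) → (∀ x, pvGet LA x = pvGet LB x) →
      (seeds.foldl (fun st p =>
          (st.1 + 1, floodA grid w h (st.1 + 1) FUEL (st.2.insert p (st.1 + 1)) p))
        (c, LA)).1 =
      (seeds.foldl (fun st p =>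
          (st.1 + 1, floodB grid h w (st.1 + 1) FUEL (st.2.insert p (st.1 + 1)) [p]))
        (c, LB)).1 ∧
      ∀ x, pvGet (seeds.foldl (fun st p =>
          (st.1 + 1, floodA grid w h (st.1 + 1) FUEL (st.2.insert p (st.1 + 1)) p))
        (c, LA)).2 x =
        pvGet (seeds.foldl (fun st p =>
          (st.1 + 1, floodB grid h w (st.1 + 1) FUEL (st.2.insert p (st.1 + 1)) [p]))
        (c, LB)).2 x := by
  intro seeds
  induction seeds with
  | nil => intro c LA LB _ _ hLL; exact ⟨rfl, hLL⟩
  | cons p seeds ihs =>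
    intro c LA LB hc hIn hLL
    rw [List.foldl_cons, List.foldl_cons]
    dsimp only
    have hp : pvInR h w p := hIn p List.mem_cons_self
    have hl : (c + 1) ≠ 0 := by omega
    have hLL1 : ∀ x, pvGet (LA.insert p (c + 1)) x = pvGet (LB.insert p (c + 1)) x := by
      intro x
      rw [pvGet_insert, pvGet_insert]
      by_cases hx : x = p <;> simp [hx, hLL x]
    have hGiff : ∀ x, pvGood grid (LA.insert p (c + 1)) x ↔ pvGood grid (LB.insert p (c + 1)) x := by
      intro x
      unfold pvGood
      rw [hLL1 x]
    have hZA : pvZ h w (LA.insert p (c + 1)) < FUEL :=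
      lt_of_le_of_lt (pvZ_le_area h w _) hfuel
    have hZB : pvZ h w (LB.insert p (c + 1)) + ([p] : List (Int × Int)).length ≤ FUEL := by
      have := pvZ_le_area h w (LB.insert p (c + 1))
      simp only [List.length_cons, List.length_nil]
      omega
    have hA := floodA_char grid w h (c + 1) hl FUEL (LA.insert p (c + 1)) p hp hZA
    have hB := floodB_char grid w h (c + 1) hl FUEL (LB.insert p (c + 1)) [p]
      (by intro e he; rw [List.mem_singleton] at he; subst he; exact hp) hZB
    have hnew : ∀ x, pvGet (floodA grid w h (c + 1) FUEL (LA.insert p (c + 1)) p) x =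
        pvGet (floodB grid h w (c + 1) FUEL (LB.insert p (c + 1)) [p]) x := by
      intro x
      by_cases hR : pvRch w h (pvGood grid (LA.insert p (c + 1))) p x
      · rw [(hA x).1 hR, (hB x).1 ⟨p, List.mem_singleton.mpr rfl,
          pvRch_mono w h _ _ (fun z hz => (hGiff z).mp hz) p x hR⟩]
      · have hR' : ¬ pvSB grid w h [p] (LB.insert p (c + 1)) x := by
          rintro ⟨e, he, hRb⟩
          rw [List.mem_singleton] at he
          subst he
          exact hR (pvRch_mono w h _ _ (fun z hz => (hGiff z).mpr hz) e x hRb)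
        rw [(hA x).2 hR, (hB x).2 hR', hLL1 x]
    exact ihs (c + 1) _ _ (by omega) (fun x hx => hIn x (List.mem_cons_of_mem _ hx)) hnew

-- every value B's fold ever writes is a label in 1..(final counter)
theorem seedsFoldB_vals (grid : List (List Int)) (w h : Int) (FUEL : Nat)
    (hfuel : h.toNat * w.toNat < FUEL) :
    ∀ (seeds : List (Int × Int)) (c : Int) (L : PySem.Dict (Int × Int) Int),
      0 ≤ c → (∀ q ∈ seeds, pvInR h w q) →
      (∀ x, pvGet L x = 0 ∨ (1 ≤ pvGet L x ∧ pvGet L x ≤ c)) →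
      (seeds.foldl (fun st p =>
          (st.1 + 1, floodB grid h w (st.1 + 1) FUEL (st.2.insert p (st.1 + 1)) [p]))
        (c, L)).1 = c + seeds.length ∧
      ∀ x, pvGet (seeds.foldl (fun st p =>
          (st.1 + 1, floodB grid h w (st.1 + 1) FUEL (st.2.insert p (st.1 + 1)) [p]))
        (c, L)).2 x = 0 ∨
        (1 ≤ pvGet (seeds.foldl (fun st p =>
            (st.1 + 1, floodB grid h w (st.1 + 1) FUEL (st.2.insert p (st.1 + 1)) [p]))
          (c, L)).2 x ∧
         pvGet (seeds.foldl (fun st p =>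
            (st.1 + 1, floodB grid h w (st.1 + 1) FUEL (st.2.insert p (st.1 + 1)) [p]))
          (c, L)).2 x ≤ (seeds.foldl (fun st p =>
            (st.1 + 1, floodB grid h w (st.1 + 1) FUEL (st.2.insert p (st.1 + 1)) [p]))
          (c, L)).1) := by
  intro seeds
  induction seeds with
  | nil =>
    intro c L _ _ hv
    refine ⟨by simp, ?_⟩
    intro x
    rcases hv x with h0 | ⟨ha, hb⟩
    · exact Or.inl h0
    · exact Or.inr ⟨ha, by simpa using hb⟩
  | cons p seeds ihs =>
    intro c L hc hIn hv
    rw [List.foldl_cons]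
    dsimp only
    have hp : pvInR h w p := hIn p List.mem_cons_self
    have hl : (c + 1) ≠ 0 := by omega
    have hZB : pvZ h w (L.insert p (c + 1)) + ([p] : List (Int × Int)).length ≤ FUEL := by
      have := pvZ_le_area h w (L.insert p (c + 1))
      simp only [List.length_cons, List.length_nil]
      omega
    have hB := floodB_char grid w h (c + 1) hl FUEL (L.insert p (c + 1)) [p]
      (by intro e he; rw [List.mem_singleton] at he; subst he; exact hp) hZB
    have hv' : ∀ x, pvGet (floodB grid h w (c + 1) FUEL (L.insert p (c + 1)) [p]) x = 0 ∨
        (1 ≤ pvGet (floodB grid h w (c + 1) FUEL (L.insert p (c + 1)) [p]) x ∧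
         pvGet (floodB grid h w (c + 1) FUEL (L.insert p (c + 1)) [p]) x ≤ c + 1) := by
      intro x
      by_cases hSB : pvSB grid w h [p] (L.insert p (c + 1)) x
      · rw [(hB x).1 hSB]; right; omega
      · rw [(hB x).2 hSB, pvGet_insert]
        by_cases hx : x = p
        · rw [if_pos hx]; right; omega
        · rw [if_neg hx]
          rcases hv x with h0 | ⟨ha, hb⟩
          · exact Or.inl h0
          · right; omega
    have := ihs (c + 1) (floodB grid h w (c + 1) FUEL (L.insert p (c + 1)) [p])
      (by omega) (fun x hx => hIn x (List.mem_cons_of_mem _ hx)) hv'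
    refine ⟨?_, this.2⟩
    rw [this.1]
    simp only [List.length_cons]
    push_cast
    ring

theorem erase_items_counter (s : List Int) :
    ((PySem.Dict.counter s).erase 0).items =
      (PySem.Dict.counter s).items.filter (fun kv => decide (kv.1 ≠ 0)) := by
  show (PySem.Dict.counter s).items.filter (fun p => !(p.1 == 0)) = _
  apply List.filter_congr
  intro kv _
  by_cases hk : kv.1 = 0 <;> simp [hk]

theorem sorted_desc_congr (l₁ l₂ : List Int) (hp : l₁.Perm l₂) :
    PySem.List.sorted l₁ (fun v => v) true = PySem.List.sorted l₂ (fun v => v) true := by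
  have hperm : (PySem.List.sorted l₁ (fun v => v) true).Perm
      (PySem.List.sorted l₂ (fun v => v) true) :=
    ((PySem.List.sorted_perm l₁ (fun v => v) true).trans hp).trans
      (PySem.List.sorted_perm l₂ (fun v => v) true).symm
  exact hperm.eq_of_pairwise (fun a b _ _ hab hba => le_antisymm hba hab)
    (PySem.List.sorted_pairwise_rev l₁ (fun v => v))
    (PySem.List.sorted_pairwise_rev l₂ (fun v => v))

theorem map_snd_sorted_rev {κ : Type} (l : List (κ × Int)) :
    (PySem.List.sorted l (fun kv => kv.2) true).map (fun kv => kv.2) =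
      PySem.List.sorted (l.map (fun kv => kv.2)) (fun v => v) true := by
  have hperm : ((PySem.List.sorted l (fun kv => kv.2) true).map (fun kv => kv.2)).Perm
      (PySem.List.sorted (l.map (fun kv => kv.2)) (fun v => v) true) :=
    ((PySem.List.sorted_perm l (fun kv => kv.2) true).map _).trans
      (PySem.List.sorted_perm (l.map (fun kv => kv.2)) (fun v => v) true).symm
  have h1 : List.Pairwise (fun a b : Int => b ≤ a)
      ((PySem.List.sorted l (fun kv => kv.2) true).map (fun kv => kv.2)) :=
    List.pairwise_map.mpr (PySem.List.sorted_pairwise_rev l (fun kv => kv.2))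
  have h2 : List.Pairwise (fun a b : Int => b ≤ a)
      (PySem.List.sorted (l.map (fun kv => kv.2)) (fun v => v) true) :=
    PySem.List.sorted_pairwise_rev (l.map (fun kv => kv.2)) (fun v => v)
  exact hperm.eq_of_pairwise (fun a b _ _ hab hba => le_antisymm hba hab) h1 h2

-- A's pair-valued top-3 product equals the same product over the bare value list
theorem top3_prod_pairs (l : List (Int × Int)) :
    ((PySem.List.sorted l (fun kv => kv.2) true).take 3).foldl (fun r kv => r * kv.2) 1 =
      ((PySem.List.sorted (l.map (fun kv => kv.2)) (fun v => v) true).take 3).foldl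
        (fun r v => r * v) 1 := by
  rw [← map_snd_sorted_rev l, ← List.map_take, List.foldl_map]

-- ===== VERDICT (by name: the statement is the Claim_ definition above) =====
theorem three_largest_basins_spec : Claim_equal_three_largest_basins := by
  intro grid _hdom _hpre
  unfold Spec_three_largest_basins three_largest_basins three_largest_basins_alt
  dsimp only
  rw [PySem.List.foldl_if_eq_foldl_filter]
  set hh : Int := (grid.length : Int) with hhdef
  set ww : Int := ((grid.headD []).length : Int) with wwdef
  set FUEL : Nat := grid.length * (grid.headD []).length + 1 with hFUELdef
  have hfuel : hh.toNat * ww.toNat < FUEL := by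
    rw [hhdef, wwdef, hFUELdef]
    simp
  -- B's seed list is A's filtered cell list
  have hseedlist : (bCells hh ww).filter (bSeed grid hh ww) =
      (pvCells hh ww).filter (fun p => pvIsMin grid ww hh p) := by
    rw [bCells_eq]
    apply List.filter_congr
    intro p hp
    exact bSeed_eq grid hh ww p ((mem_pvCells hh ww p).mp hp)
  rw [hseedlist, bCells_eq]
  have hseeds : ∀ q ∈ (pvCells hh ww).filter (fun p => pvIsMin grid ww hh p), pvInR hh ww q := by
    intro q hq
    exact (mem_pvCells hh ww q).mp (List.mem_of_mem_filter hq)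
  obtain ⟨-, hpt⟩ := seedsFold_eq grid ww hh FUEL hfuel
    ((pvCells hh ww).filter (fun p => pvIsMin grid ww hh p)) 0
    PySem.Dict.empty PySem.Dict.empty le_rfl hseeds (fun _ => rfl)
  set finB := (((pvCells hh ww).filter (fun p => pvIsMin grid ww hh p)).foldl (fun st p =>
      (st.1 + 1, floodB grid hh ww (st.1 + 1) FUEL (st.2.insert p (st.1 + 1)) [p]))
    (0, PySem.Dict.empty)) with hfinB
  have hBlam : (fun p => PySem.Dict.getD finB.2 p 0) = pvGet finB.2 := rfl
  rw [hBlam]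
  have hstream : (pvCells hh ww).map (pvGet (((pvCells hh ww).filter
        (fun p => pvIsMin grid ww hh p)).foldl (fun st p =>
          (st.1 + 1, floodA grid ww hh (st.1 + 1) FUEL (st.2.insert p (st.1 + 1)) p))
        (0, PySem.Dict.empty)).2) =
      (pvCells hh ww).map (pvGet finB.2) :=
    List.map_congr_left (fun p _ => hpt p)
  rw [hstream, erase_items_counter, PySem.Dict.items_counter, top3_prod_pairs]
  set flat := (pvCells hh ww).map (pvGet finB.2) with hflat
  -- A's value list: counts of the distinct nonzero labels occurring in flat
  rw [List.filter_map, List.map_map]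
  -- B's size list: counts of the labels 1..finB.1 with a nonzero count
  rw [PySem.List.foldl_append_ite (p := fun l => ((flat.count l : Int)) ≠ 0)
    (f := fun l => ((flat.count l : Int)))]
  rw [List.nil_append]
  -- invariant: every label in flat is 0 or in 1..finB.1
  obtain ⟨-, hvals⟩ := seedsFoldB_vals grid ww hh FUEL hfuel
    ((pvCells hh ww).filter (fun p => pvIsMin grid ww hh p)) 0
    PySem.Dict.empty le_rfl hseeds (fun _ => Or.inl rfl)
  have hvflat : ∀ v ∈ flat, v = 0 ∨ (1 ≤ v ∧ v ≤ finB.1) := by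
    intro v hv
    rw [hflat] at hv
    rcases List.mem_map.mp hv with ⟨p, -, rfl⟩
    exact hvals p
  -- the two key lists are permutations, hence the two sorted value lists are equal
  have hkeysA : ((PySem.Set.ofList flat).filter
      ((fun kv => decide (kv.1 ≠ 0)) ∘ fun k => (k, (flat.count k : Int)))).Nodup :=
    (PySem.Set.nodup_ofList flat).filter _
  have hkeysB : ((PySem.List.pyRange 1 (finB.1 + 1) 1).filter
      (fun l => decide (((flat.count l : Int)) ≠ 0))).Nodup :=
    (PySem.List.nodup_pyRange_one 1 (finB.1 + 1)).filter _
  have hmem : ∀ k, k ∈ ((PySem.Set.ofList flat).filter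
        ((fun kv => decide (kv.1 ≠ 0)) ∘ fun k => (k, (flat.count k : Int)))) ↔
      k ∈ ((PySem.List.pyRange 1 (finB.1 + 1) 1).filter
        (fun l => decide (((flat.count l : Int)) ≠ 0))) := by
    intro k
    simp only [List.mem_filter, PySem.Set.mem_ofList, PySem.List.mem_pyRange_one,
      Function.comp_apply, decide_eq_true_eq]
    constructor
    · rintro ⟨hmemf, hk0⟩
      have hk : k ≠ 0 := hk0
      have hcnt : flat.count k ≠ 0 :=
        Nat.pos_iff_ne_zero.mp (List.count_pos_iff.mpr hmemf)
      rcases hvflat k hmemf with rfl | ⟨ha, hb⟩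
      · exact absurd rfl hk
      · exact ⟨⟨ha, by omega⟩, by exact_mod_cast hcnt⟩
    · rintro ⟨⟨hk1, hk2⟩, hc⟩
      have hcnt : flat.count k ≠ 0 := by exact_mod_cast hc
      refine ⟨List.count_pos_iff.mp (Nat.pos_of_ne_zero hcnt), ?_⟩
      exact (show k ≠ 0 by omega)
  have hperm := ((List.perm_ext_iff_of_nodup hkeysA hkeysB).mpr hmem).map
    ((fun kv : Int × Int => kv.2) ∘ fun k => (k, ((flat.count k : Int))))
  rw [sorted_desc_congr _ _ hperm]
  rfl
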